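-- pv_equiv track=rewrite | github.com/narennravi/Guvi---CODE_KATA | Sort/25.py | construct_postorder
-- ===== SOURCE A (Python) =====
-- def construct_postorder(preorder):
--     if not preorder:
--         return []
--
--     root = preorder[0]
--     left_subtree = [x for x in preorder if x < root]
--     right_subtree = [x for x in preorder if x > root]
--
--     postorder_left = construct_postorder(left_subtree)
--     postorder_right = construct_postorder(right_subtree)
--
--     return postorder_left + postorder_right + [root]
-- ===== SOURCE B (Python) =====
-- def _insert(tree, x):
--     """tree is None or (left, value, right); duplicates ignored."""
--     if tree is None:
--         return (None, x, None)
--     left, v, right = tree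
--     if x < v:
--         return (_insert(left, x), v, right)
--     if x > v:
--         return (left, v, _insert(right, x))
--     return tree
--
--
-- def _postorder(tree, acc):
--     if tree is None:
--         return acc
--     left, v, right = tree
--     acc = _postorder(left, acc)
--     acc = _postorder(right, acc)
--     acc.append(v)
--     return acc
--
--
-- def construct_postorder(preorder):
--     tree = None
--     for x in preorder:
--         tree = _insert(tree, x)
--     return _postorder(tree, [])
-- ===== Notes on version B (the rewrite author's own statement) =====
-- stated objective: alternative
-- what changed: A recursively partitions the whole list around its first element at every level (rescanning sublists); B builds an explicit BST once by inserting the values in order (duplicates ignored) and then emits a single postorder traversal of that tree.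
import Mathlib
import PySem

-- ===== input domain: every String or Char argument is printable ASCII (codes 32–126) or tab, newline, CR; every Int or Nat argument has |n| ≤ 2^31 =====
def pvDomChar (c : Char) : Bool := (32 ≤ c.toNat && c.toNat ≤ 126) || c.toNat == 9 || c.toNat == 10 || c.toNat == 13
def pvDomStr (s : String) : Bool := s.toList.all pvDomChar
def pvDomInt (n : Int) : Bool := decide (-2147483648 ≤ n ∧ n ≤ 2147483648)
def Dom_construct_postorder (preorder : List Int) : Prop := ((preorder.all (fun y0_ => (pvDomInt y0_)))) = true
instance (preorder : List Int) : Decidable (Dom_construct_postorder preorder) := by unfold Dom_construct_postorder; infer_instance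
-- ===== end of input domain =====

-- B replaces A's repeated list re-partitioning by building an explicit BST once
-- (insertion-fold, duplicates ignored) and emitting one postorder traversal (objective: alternative).


-- ===== PORT A =====
def construct_postorder : List Int → List Int
  | [] => []
  | root :: rest =>
    let left_subtree := (root :: rest).filter (fun x => x < root)
    let right_subtree := (root :: rest).filter (fun x => x > root)
    construct_postorder left_subtree ++ construct_postorder right_subtree ++ [root]
termination_by p => p.length
decreasing_by
  · simp only [List.filter_cons, lt_irrefl, decide_false]
    exact Nat.lt_succ_of_le (List.length_filter_le _ _)
  · simp only [List.filter_cons, gt_iff_lt, lt_irrefl, decide_false]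
    exact Nat.lt_succ_of_le (List.length_filter_le _ _)

-- ===== PORT B =====
inductive PVTree where
  | leaf : PVTree
  | node : PVTree → Int → PVTree → PVTree
deriving DecidableEq, Repr

def pvInsert : PVTree → Int → PVTree
  | .leaf, x => .node .leaf x .leaf
  | .node l v r, x =>
    if x < v then .node (pvInsert l x) v r
    else if x > v then .node l v (pvInsert r x)
    else .node l v r

def pvPostorder : PVTree → List Int → List Int
  | .leaf, acc => acc
  | .node l v r, acc => pvPostorder r (pvPostorder l acc) ++ [v]

def construct_postorder_alt (preorder : List Int) : List Int :=
  pvPostorder (preorder.foldl pvInsert .leaf) []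

-- ===== PRECONDITION & SPEC =====
def Spec_construct_postorder (preorder : List Int) (out : List Int) : Prop := out = construct_postorder_alt preorder
instance (preorder : List Int) (out : List Int) : Decidable (Spec_construct_postorder preorder out) := by unfold Spec_construct_postorder; infer_instance

-- ===== CLAIM (what is proved, stated in full; the proofs are below) =====
def Claim_equal_construct_postorder : Prop := ∀ (preorder : List Int), Dom_construct_postorder preorder → Spec_construct_postorder preorder (construct_postorder preorder)

-- ===== LEMMAS AND PROOFS =====

theorem pvPostorder_acc (t : PVTree) : ∀ acc : List Int, pvPostorder t acc = acc ++ pvPostorder t [] := by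
  induction t with
  | leaf => intro acc; simp [pvPostorder]
  | node l v r ihl ihr =>
    intro acc
    simp only [pvPostorder]
    rw [ihl acc, ihr (acc ++ pvPostorder l []), ihr (pvPostorder l [])]
    simp

theorem foldl_pvInsert_node (xs : List Int) : ∀ (l r : PVTree) (v : Int),
    xs.foldl pvInsert (.node l v r)
      = .node ((xs.filter (fun x => x < v)).foldl pvInsert l) v
              ((xs.filter (fun x => x > v)).foldl pvInsert r) := by
  induction xs with
  | nil => intro l r v; simp
  | cons x xs ih =>
    intro l r v
    simp only [List.foldl_cons, List.filter_cons]
    by_cases h1 : x < v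
    · have h2 : ¬ x > v := by omega
      simp [pvInsert, h1, h2, ih]
    · by_cases h2 : x > v
      · simp [pvInsert, h1, h2, ih]
      · simp [pvInsert, h1, h2, ih]

theorem construct_eq_alt : ∀ p : List Int, construct_postorder p = construct_postorder_alt p := by
  intro p
  induction p using construct_postorder.induct with
  | case1 => simp [construct_postorder, construct_postorder_alt, pvPostorder]
  | case2 root rest lft rgt ihl ihr =>
    have hfl : (root :: rest).filter (fun x => x < root) = rest.filter (fun x => x < root) := by
      simp
    have hfr : (root :: rest).filter (fun x => x > root) = rest.filter (fun x => x > root) := by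
      simp
    simp only [lft, rgt, construct_postorder_alt, hfl, hfr] at ihl ihr
    rw [construct_postorder]
    simp only [hfl, hfr, ihl, ihr]
    have hins : pvInsert .leaf root = .node .leaf root .leaf := rfl
    simp only [construct_postorder_alt, List.foldl_cons, hins, foldl_pvInsert_node,
      pvPostorder]
    rw [pvPostorder_acc _ (pvPostorder _ [])]

-- ===== VERDICT (by name: the statement is the Claim_ definition above) =====
theorem construct_postorder_spec : Claim_equal_construct_postorder := by
  intro p _
  exact construct_eq_alt p
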